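-- pv_equiv track=rewrite | github.com/yyliu01/PS-MT | CityCode/Utils/tensor_board.py | get_voc_pallete
-- ===== SOURCE A (Python) =====
-- def get_voc_pallete(num_classes):
--     n = num_classes
--     pallete = [0] * (n * 3)
--     for j in range(0, n):
--         lab = j
--         pallete[j * 3 + 0] = 0
--         pallete[j * 3 + 1] = 0
--         pallete[j * 3 + 2] = 0
--         i = 0
--         while (lab > 0):
--             pallete[j * 3 + 0] |= (((lab >> 0) & 1) << (7 - i))
--             pallete[j * 3 + 1] |= (((lab >> 1) & 1) << (7 - i))
--             pallete[j * 3 + 2] |= (((lab >> 2) & 1) << (7 - i))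
--             i = i + 1
--             lab >>= 3
--     return pallete
-- ===== SOURCE B (Python) =====
-- def get_voc_pallete(num_classes):
--     n = num_classes
--     if n <= 0:
--         return []
--     pallete = [0, 0, 0]
--     for j in range(1, n):
--         k = j >> 3
--         pallete.append((pallete[k * 3 + 0] >> 1) | ((j & 1) << 7))
--         pallete.append((pallete[k * 3 + 1] >> 1) | (((j >> 1) & 1) << 7))
--         pallete.append((pallete[k * 3 + 2] >> 1) | (((j >> 2) & 1) << 7))
--     return pallete
-- ===== Notes on version B (the rewrite author's own statement) =====
-- stated objective: faster
-- what changed: Instead of re-deriving each RGB triple with an inner per-bit while loop over j's base-8 digits, B builds the palette in one forward pass, computing class j's triple directly from the already-computed triple of class j//8 (shift down one bit, OR the new bit at position 7).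
import Mathlib
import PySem

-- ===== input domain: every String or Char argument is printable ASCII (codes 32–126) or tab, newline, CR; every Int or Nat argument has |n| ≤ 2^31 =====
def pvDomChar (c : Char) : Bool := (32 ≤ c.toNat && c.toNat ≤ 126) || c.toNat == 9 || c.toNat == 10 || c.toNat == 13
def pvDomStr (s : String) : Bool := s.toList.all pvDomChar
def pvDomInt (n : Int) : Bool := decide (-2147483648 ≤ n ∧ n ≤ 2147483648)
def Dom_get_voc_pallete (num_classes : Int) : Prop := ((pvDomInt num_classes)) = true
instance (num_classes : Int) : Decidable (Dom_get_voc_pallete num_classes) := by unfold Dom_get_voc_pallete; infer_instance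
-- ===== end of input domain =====

-- B replaces A's per-class inner bit loop by a single forward pass deriving entry j from the
-- already-computed entry j//8 (a different algorithm of the same asymptotic cost).
-- All intermediate Python ints here are nonnegative, so both ports compute in Nat and cast
-- to Int at the end (exact on the admitted inputs).

-- ===== PORT A =====
-- the three `|=` assignments of one iteration of A's `while lab > 0` loop; `7 - i` is Nat
-- subtraction, which agrees with Python's `7 - i` whenever i ≤ 7 — guaranteed on Pre_
-- (past that the Python raises, see Pre_).
def pvSet3 (pal : List Nat) (j lab i : Nat) : List Nat :=
  let pal := pal.set (j * 3 + 0) ((pal.getD (j * 3 + 0) 0) ||| (((lab >>> 0) &&& 1) <<< (7 - i)))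
  let pal := pal.set (j * 3 + 1) ((pal.getD (j * 3 + 1) 0) ||| (((lab >>> 1) &&& 1) <<< (7 - i)))
  pal.set (j * 3 + 2) ((pal.getD (j * 3 + 2) 0) ||| (((lab >>> 2) &&& 1) <<< (7 - i)))

-- A's `while lab > 0` loop (`lab >>= 3` terminates it)
def pvInnerA (pal : List Nat) (j lab i : Nat) : List Nat :=
  if h : 0 < lab then pvInnerA (pvSet3 pal j lab i) j (lab >>> 3) (i + 1)
  else pal
termination_by lab
decreasing_by simpa [Nat.shiftRight_eq_div_pow] using Nat.div_lt_self h (by norm_num)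

-- body of A's `for j in range(0, n)` loop: three zero-writes, then the while loop
def pvStepA (pal : List Nat) (j : Nat) : List Nat :=
  let pal := pal.set (j * 3 + 0) 0
  let pal := pal.set (j * 3 + 1) 0
  let pal := pal.set (j * 3 + 2) 0
  pvInnerA pal j j 0

-- `range(0, n)` is empty for n ≤ 0, hence `List.range num_classes.toNat`;
-- `[0] * (n * 3)` is `List.replicate (n * 3).toNat 0` (also empty for n ≤ 0).
def get_voc_pallete (num_classes : Int) : List Int :=
  ((List.range num_classes.toNat).foldl pvStepA
      (List.replicate (num_classes * 3).toNat 0)).map Int.ofNat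

-- ===== PORT B =====
-- body of B's `for j in range(1, n)` loop: three appends, each reading the entry of class j >> 3
def pvStepB (pal : List Nat) (j : Nat) : List Nat :=
  let k := j >>> 3
  let pal := pal ++ [((pal.getD (k * 3 + 0) 0) >>> 1) ||| ((j &&& 1) <<< 7)]
  let pal := pal ++ [((pal.getD (k * 3 + 1) 0) >>> 1) ||| (((j >>> 1) &&& 1) <<< 7)]
  pal ++ [((pal.getD (k * 3 + 2) 0) >>> 1) ||| (((j >>> 2) &&& 1) <<< 7)]

def get_voc_pallete_alt (num_classes : Int) : List Int :=
  if num_classes ≤ 0 then []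
  else ((List.range' 1 (num_classes.toNat - 1)).foldl pvStepB [0, 0, 0]).map Int.ofNat

-- ===== PRECONDITION & SPEC =====
-- Pre_ excludes num_classes > 2^24, where the Python A raises ValueError
-- (`<< (7 - i)` is reached with i = 8, a negative shift count); A returns normally otherwise.
def Pre_get_voc_pallete (num_classes : Int) : Prop := num_classes ≤ 16777216
instance (num_classes : Int) : Decidable (Pre_get_voc_pallete num_classes) := by unfold Pre_get_voc_pallete; infer_instance
def pvWitness_get_voc_pallete : Int := 21

def Spec_get_voc_pallete (num_classes : Int) (out : List Int) : Prop := out = get_voc_pallete_alt num_classes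
instance (num_classes : Int) (out : List Int) : Decidable (Spec_get_voc_pallete num_classes out) := by unfold Spec_get_voc_pallete; infer_instance

-- ===== CLAIM (what is proved, stated in full; the proofs are below) =====
def Claim_equal_get_voc_pallete : Prop := ∀ (num_classes : Int), Dom_get_voc_pallete num_classes → Pre_get_voc_pallete num_classes → Spec_get_voc_pallete num_classes (get_voc_pallete num_classes)

-- ===== LEMMAS AND PROOFS =====

theorem pvShr3_lt (lab : Nat) (h : 0 < lab) : lab >>> 3 < lab := by
  simpa [Nat.shiftRight_eq_div_pow] using Nat.div_lt_self h (by norm_num)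

-- reference value of channel c of class j (B's recurrence)
def pvF (j c : Nat) : Nat :=
  if h : 0 < j then (pvF (j >>> 3) c) >>> 1 ||| (((j >>> c) &&& 1) <<< 7)
  else 0
termination_by j
decreasing_by simpa [Nat.shiftRight_eq_div_pow] using Nat.div_lt_self h (by norm_num)

-- accumulated OR contributed to channel c by A's while loop started at (lab, i)
def pvW (c lab i : Nat) : Nat :=
  if h : 0 < lab then (((lab >>> c) &&& 1) <<< (7 - i)) ||| pvW c (lab >>> 3) (i + 1)
  else 0
termination_by lab
decreasing_by simpa [Nat.shiftRight_eq_div_pow] using Nat.div_lt_self h (by norm_num)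

-- one-step equation lemmas (rw-friendly forms of the dite definitions)
theorem pvW_zero (c i : Nat) : pvW c 0 i = 0 := by rw [pvW]; simp
theorem pvW_pos (c lab i : Nat) (h : 0 < lab) :
    pvW c lab i = (((lab >>> c) &&& 1) <<< (7 - i)) ||| pvW c (lab >>> 3) (i + 1) := by
  rw [pvW]; simp [h]
theorem pvF_zero (c : Nat) : pvF 0 c = 0 := by rw [pvF]; simp
theorem pvF_pos (j c : Nat) (h : 0 < j) :
    pvF j c = (pvF (j >>> 3) c) >>> 1 ||| (((j >>> c) &&& 1) <<< 7) := by rw [pvF]; simp [h]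
theorem pvInnerA_zero (pal : List Nat) (j i : Nat) : pvInnerA pal j 0 i = pal := by
  rw [pvInnerA]; simp
theorem pvInnerA_pos (pal : List Nat) (j lab i : Nat) (h : 0 < lab) :
    pvInnerA pal j lab i = pvInnerA (pvSet3 pal j lab i) j (lab >>> 3) (i + 1) := by
  rw [pvInnerA]; simp [h]

theorem pvGetD_set (l : List Nat) (i v j d : Nat) :
    (l.set i v).getD j d = if i = j ∧ i < l.length then v else l.getD j d := by
  simp only [List.getD_eq_getElem?_getD, List.getElem?_set]
  split_ifs with h1 h2 <;> simp_all <;> omega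

theorem pvGetD_append_right (l l' : List Nat) (i d : Nat) (h : l.length ≤ i) :
    (l ++ l').getD i d = l'.getD (i - l.length) d := by
  simp [List.getD_eq_getElem?_getD, List.getElem?_append_right h]

theorem pvShl7_shr (b i : Nat) (hi : i ≤ 7) : (b <<< 7) >>> i = b <<< (7 - i) := by
  simp only [Nat.shiftLeft_eq, Nat.shiftRight_eq_div_pow]
  have h : (2:Nat) ^ 7 = 2 ^ (7 - i) * 2 ^ i := by rw [← pow_add]; congr 1; omega
  rw [h, ← Nat.mul_assoc, Nat.mul_div_cancel _ (Nat.pow_pos (by norm_num))]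

-- A's while-loop accumulator is B's recurrence value, shifted: needs lab < 8^(8-i), i.e. the
-- loop never reaches i = 8 with lab still positive (exactly what Pre_ guarantees for lab = j)
theorem pvW_eq (c lab i : Nat) (hi : i ≤ 8) (hl : lab < 8 ^ (8 - i)) :
    pvW c lab i = pvF lab c >>> i := by
  induction lab using Nat.strong_induction_on generalizing i with
  | _ lab IH =>
    by_cases h : 0 < lab
    · have hi7 : i ≤ 7 := by
        by_contra hgt
        have h8 : 8 - i = 0 := by omega
        rw [h8] at hl; simp at hl; omega
      have hrec : lab >>> 3 < 8 ^ (8 - (i + 1)) := by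
        have hdiv : lab >>> 3 = lab / 8 := by simp [Nat.shiftRight_eq_div_pow]
        rw [hdiv, Nat.div_lt_iff_lt_mul (by norm_num)]
        calc lab < 8 ^ (8 - i) := hl
          _ = 8 ^ (8 - (i + 1)) * 8 := by rw [← pow_succ]; congr 1; omega
      rw [pvW_pos _ _ _ h, pvF_pos _ _ h, IH _ (pvShr3_lt _ h) (i + 1) (by omega) hrec,
        Nat.shiftRight_or_distrib, pvShl7_shr _ _ hi7, ← Nat.shiftRight_add,
        Nat.or_comm, Nat.add_comm 1 i]
    · have h0 : lab = 0 := by omega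
      subst h0
      rw [pvW_zero, pvF_zero, Nat.zero_shiftRight]

theorem pvSet3_length (pal : List Nat) (j lab i : Nat) :
    (pvSet3 pal j lab i).length = pal.length := by simp [pvSet3]

theorem pvInnerA_len (pal : List Nat) (j lab i : Nat) :
    (pvInnerA pal j lab i).length = pal.length := by
  induction lab using Nat.strong_induction_on generalizing pal i with
  | _ lab IH =>
    by_cases h : 0 < lab
    · rw [pvInnerA_pos _ _ _ _ h, IH _ (pvShr3_lt _ h), pvSet3_length]
    · have h0 : lab = 0 := by omega
      subst h0; rw [pvInnerA_zero]

theorem pvSet3_getD (pal : List Nat) (j lab i m : Nat) (hlen : j * 3 + 2 < pal.length) :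
    (pvSet3 pal j lab i).getD m 0 =
      if m = j * 3 + 0 then pal.getD m 0 ||| (((lab >>> 0) &&& 1) <<< (7 - i))
      else if m = j * 3 + 1 then pal.getD m 0 ||| (((lab >>> 1) &&& 1) <<< (7 - i))
      else if m = j * 3 + 2 then pal.getD m 0 ||| (((lab >>> 2) &&& 1) <<< (7 - i))
      else pal.getD m 0 := by
  simp only [pvSet3, pvGetD_set, List.length_set]
  split_ifs <;> first | rfl | omega | (subst m; rfl)

-- the while loop ORs pvW into the three cells of class j and touches nothing else
theorem pvInnerA_getD (pal : List Nat) (j lab i m : Nat) (hlen : j * 3 + 2 < pal.length) :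
    (pvInnerA pal j lab i).getD m 0 =
      if m = j * 3 + 0 then pal.getD m 0 ||| pvW 0 lab i
      else if m = j * 3 + 1 then pal.getD m 0 ||| pvW 1 lab i
      else if m = j * 3 + 2 then pal.getD m 0 ||| pvW 2 lab i
      else pal.getD m 0 := by
  induction lab using Nat.strong_induction_on generalizing pal i with
  | _ lab IH =>
    by_cases h : 0 < lab
    · rw [pvInnerA_pos _ _ _ _ h,
        IH _ (pvShr3_lt _ h) _ _ (by rw [pvSet3_length]; exact hlen),
        pvSet3_getD _ _ _ _ _ hlen,
        pvW_pos 0 _ _ h, pvW_pos 1 _ _ h, pvW_pos 2 _ _ h]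
      split_ifs <;> simp_all [Nat.or_assoc] <;> omega
    · have h0 : lab = 0 := by omega
      subst h0
      rw [pvInnerA_zero, pvW_zero, pvW_zero, pvW_zero]
      split_ifs <;> simp

-- the canonical palette of the first t classes, flattened
def pvFlat (t : Nat) : List Nat :=
  (List.range t).flatMap (fun j => [pvF j 0, pvF j 1, pvF j 2])

theorem pvFlat_succ (t : Nat) : pvFlat (t + 1) = pvFlat t ++ [pvF t 0, pvF t 1, pvF t 2] := by
  simp [pvFlat, List.range_succ]

theorem pvFlat_length (t : Nat) : (pvFlat t).length = t * 3 := by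
  induction t with
  | zero => simp [pvFlat]
  | succ t ih => simp [pvFlat_succ, ih]; omega

theorem pvFlat_getD (t k c : Nat) (hk : k < t) (hc : c < 3) :
    (pvFlat t).getD (k * 3 + c) 0 = pvF k c := by
  induction t with
  | zero => omega
  | succ t ih =>
    rw [pvFlat_succ]
    rcases Nat.lt_or_ge k t with h | h
    · rw [List.getD_append _ _ _ _ (by rw [pvFlat_length]; omega)]
      exact ih h
    · have hkt : k = t := by omega
      subst hkt
      rw [pvGetD_append_right _ _ _ _ (by rw [pvFlat_length]; omega), pvFlat_length]
      interval_cases c <;> simp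

-- B's fold builds the canonical palette
theorem pvB_inv (t : Nat) :
    (List.range' 1 t).foldl pvStepB [0, 0, 0] = pvFlat (t + 1) := by
  induction t with
  | zero => simp [pvFlat, pvF_zero]
  | succ t ih =>
    rw [List.range'_1_concat, List.foldl_append, ih]
    simp only [List.foldl_cons, List.foldl_nil, pvStepB]
    have hj : 1 + t = t + 1 := by omega
    rw [hj]
    have hk : (t + 1) >>> 3 < t + 1 := pvShr3_lt _ (Nat.succ_pos t)
    rw [pvFlat_getD (t + 1) _ 0 hk (by norm_num)]
    rw [List.getD_append _ _ _ _ (by rw [pvFlat_length]; omega),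
      pvFlat_getD (t + 1) _ 1 hk (by norm_num)]
    rw [List.getD_append _ _ _ _ (by simp [pvFlat_length]; omega),
      List.getD_append _ _ _ _ (by rw [pvFlat_length]; omega),
      pvFlat_getD (t + 1) _ 2 hk (by norm_num)]
    rw [pvFlat_succ (t + 1), pvF_pos (t + 1) 0 (Nat.succ_pos t),
      pvF_pos (t + 1) 1 (Nat.succ_pos t), pvF_pos (t + 1) 2 (Nat.succ_pos t)]
    simp

-- A's fold builds the canonical palette followed by the still-untouched zeros
theorem pvA_inv (n t : Nat) (ht : t ≤ n) (hn : n ≤ 16777216) :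
    (List.range t).foldl pvStepA (List.replicate (n * 3) 0) =
      pvFlat t ++ List.replicate ((n - t) * 3) 0 := by
  induction t with
  | zero => simp [pvFlat]
  | succ t ih =>
    rw [List.range_succ, List.foldl_append, ih (by omega)]
    simp only [List.foldl_cons, List.foldl_nil]
    have hlen0 : (pvFlat t ++ List.replicate ((n - t) * 3) 0).length = n * 3 := by
      simp [pvFlat_length]; omega
    -- the three zero-writes are identities: those cells hold 0 already
    have hgd0 : ∀ c, c < 3 → (pvFlat t ++ List.replicate ((n - t) * 3) 0).getD (t * 3 + c) 0 = 0 := by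
      intro c hc
      rw [pvGetD_append_right _ _ _ _ (by rw [pvFlat_length]; omega), pvFlat_length]
      exact List.getD_replicate _ (by omega)
    simp only [pvStepA]
    set pal0 := ((pvFlat t ++ List.replicate ((n - t) * 3) 0).set (t * 3 + 0) 0).set (t * 3 + 1) 0 |>.set (t * 3 + 2) 0 with hpal0
    have hlen1 : pal0.length = n * 3 := by simp [hpal0, hlen0]
    have hgd1 : ∀ m, pal0.getD m 0 = (pvFlat t ++ List.replicate ((n - t) * 3) 0).getD m 0 := by
      intro m
      rw [hpal0]
      simp only [pvGetD_set, List.length_set]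
      split_ifs with h1 h2 h3 <;>
        [ (rw [← h1.1]; exact (hgd0 2 (by norm_num)).symm);
          (rw [← h2.1]; exact (hgd0 1 (by norm_num)).symm);
          (rw [← h3.1]; exact (hgd0 0 (by norm_num)).symm);
          rfl ]
    have hlenR : (pvFlat (t + 1) ++ List.replicate ((n - (t + 1)) * 3) 0).length = n * 3 := by
      simp [pvFlat_length]; omega
    apply List.ext_getElem (by rw [pvInnerA_len, hlen1, hlenR])
    intro m hm1 hm2
    rw [← List.getD_eq_getElem _ 0 hm1, ← List.getD_eq_getElem _ 0 hm2]
    have hmn : m < n * 3 := by rw [pvInnerA_len, hlen1] at hm1; exact hm1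
    rw [pvInnerA_getD _ _ _ _ _ (by omega)]
    have hW : ∀ c, c < 3 → pvW c t 0 = pvF t c := by
      intro c hc
      rw [pvW_eq c t 0 (by omega) (by norm_num; omega), Nat.shiftRight_zero]
    by_cases h0 : m = t * 3 + 0
    · rw [if_pos h0, hgd1, h0, hgd0 0 (by norm_num), Nat.zero_or, hW 0 (by norm_num),
        List.getD_append _ _ _ _ (by rw [pvFlat_length]; omega),
        pvFlat_getD (t+1) t 0 (by omega) (by norm_num)]
    · rw [if_neg h0]
      by_cases h1 : m = t * 3 + 1
      · rw [if_pos h1, hgd1, h1, hgd0 1 (by norm_num), Nat.zero_or, hW 1 (by norm_num),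
          List.getD_append _ _ _ _ (by rw [pvFlat_length]; omega),
          pvFlat_getD (t+1) t 1 (by omega) (by norm_num)]
      · rw [if_neg h1]
        by_cases h2 : m = t * 3 + 2
        · rw [if_pos h2, hgd1, h2, hgd0 2 (by norm_num), Nat.zero_or, hW 2 (by norm_num),
            List.getD_append _ _ _ _ (by rw [pvFlat_length]; omega),
            pvFlat_getD (t+1) t 2 (by omega) (by norm_num)]
        · rw [if_neg h2, hgd1]
          rcases Nat.lt_or_ge m (t * 3) with hlo | hhi
          · rw [List.getD_append _ _ _ _ (by rw [pvFlat_length]; omega),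
              List.getD_append _ _ _ _ (by rw [pvFlat_length]; omega)]
            have hsplit : m = (m / 3) * 3 + (m % 3) := by omega
            rw [hsplit, pvFlat_getD t (m/3) (m%3) (by omega) (by omega),
              pvFlat_getD (t+1) (m/3) (m%3) (by omega) (by omega)]
          · rw [pvGetD_append_right _ _ _ _ (by rw [pvFlat_length]; omega),
              pvGetD_append_right _ _ _ _ (by rw [pvFlat_length]; omega),
              pvFlat_length, pvFlat_length,
              List.getD_replicate _ (by omega), List.getD_replicate _ (by omega)]

-- ===== VERDICT (by name: the statement is the Claim_ definition above) =====
theorem get_voc_pallete_spec : Claim_equal_get_voc_pallete := by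
  unfold Claim_equal_get_voc_pallete Spec_get_voc_pallete
  intro n _ hpre
  unfold Pre_get_voc_pallete at hpre
  unfold get_voc_pallete get_voc_pallete_alt
  by_cases hn : n ≤ 0
  · have h1 : n.toNat = 0 := by omega
    have h2 : (n * 3).toNat = 0 := by omega
    rw [if_pos hn, h1, h2]
    simp
  · rw [if_neg hn]
    have h3 : (n * 3).toNat = n.toNat * 3 := by omega
    rw [h3, pvA_inv n.toNat n.toNat le_rfl (by omega), pvB_inv (n.toNat - 1)]
    have h4 : n.toNat - 1 + 1 = n.toNat := by omega
    rw [h4]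
    simp
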